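-- pv_equiv track=rewrite | github.com/mstmhsmt/cca | cca/esecfse2018/overlap.py | overlap_of_replace
-- ===== SOURCE A (Python) =====
-- def overlap_of_ranges(a1_b1, a2_b2):
--     a1, b1 = a1_b1
--     a2, b2 = a2_b2
--     s = max(a1, a2)
--     e = min(b1, b2)
--     o = e - s
--     if o < 0:
--         o = 0
--     return o
--
-- def overlap_of_replace(repls1, repls2, toks1, toks2):
--     o = 0
--     for (r1, r2) in repls1:
--         (a1, b1) = r2
--         x = toks1[a1:b1]
--         for (r3, r4) in repls2:
--             (a2, b2) = r4
--             y = toks2[a2:b2]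
--             if x == y:
--                 o += overlap_of_ranges(r1, r3)
--     return o
-- ===== SOURCE B (Python) =====
-- def overlap_of_replace(repls1, repls2, toks1, toks2):
--     # Group the first-side replacements by their replaced token slice, so the
--     # matching pairs are found by hash lookup instead of an inner scan.
--     groups = {}
--     for (r1, r2) in repls1:
--         key = tuple(toks1[r2[0]:r2[1]])
--         groups[key] = groups.get(key, []) + [r1]
--     total = 0
--     for (r3, r4) in repls2:
--         for (a1, b1) in groups.get(tuple(toks2[r4[0]:r4[1]]), []):
--             total += max(0, min(b1, r3[1]) - max(a1, r3[0]))
--     return total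
-- ===== Notes on version B (the rewrite author's own statement) =====
-- stated objective: faster
-- what changed: B replaces A's nested scan over all (repls1, repls2) pairs by first grouping repls1 under a dict keyed by the replaced token slice and then summing overlaps only over repls2 entries' hash-matched group.
import Mathlib
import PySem

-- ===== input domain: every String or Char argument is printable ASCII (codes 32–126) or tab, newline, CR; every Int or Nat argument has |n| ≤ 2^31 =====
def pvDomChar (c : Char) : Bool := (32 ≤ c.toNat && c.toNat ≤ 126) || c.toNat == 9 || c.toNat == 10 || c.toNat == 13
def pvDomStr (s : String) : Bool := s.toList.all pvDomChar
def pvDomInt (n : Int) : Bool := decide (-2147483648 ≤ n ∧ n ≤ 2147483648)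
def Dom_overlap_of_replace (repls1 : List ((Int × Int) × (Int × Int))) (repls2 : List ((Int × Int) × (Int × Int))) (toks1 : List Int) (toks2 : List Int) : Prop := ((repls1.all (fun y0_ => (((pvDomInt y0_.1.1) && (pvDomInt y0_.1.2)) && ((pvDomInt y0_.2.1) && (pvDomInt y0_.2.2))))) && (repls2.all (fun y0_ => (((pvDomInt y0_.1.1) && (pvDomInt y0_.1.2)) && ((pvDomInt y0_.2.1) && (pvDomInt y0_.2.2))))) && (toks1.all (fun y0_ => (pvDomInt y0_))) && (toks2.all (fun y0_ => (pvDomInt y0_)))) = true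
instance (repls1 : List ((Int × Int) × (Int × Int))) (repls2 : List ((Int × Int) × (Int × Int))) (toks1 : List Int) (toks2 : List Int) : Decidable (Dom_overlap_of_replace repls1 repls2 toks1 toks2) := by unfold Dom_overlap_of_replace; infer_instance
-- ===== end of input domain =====

-- B groups repls1 by replaced token slice in a dict, replacing A's inner scan by a hash lookup (faster).
-- ===== PORT A =====
def overlap_of_ranges (a1_b1 : Int × Int) (a2_b2 : Int × Int) : Int :=
  let s := max a1_b1.1 a2_b2.1
  let e := min a1_b1.2 a2_b2.2
  let o := e - s
  if o < 0 then 0 else o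

def overlap_of_replace (repls1 : List ((Int × Int) × (Int × Int))) (repls2 : List ((Int × Int) × (Int × Int))) (toks1 : List Int) (toks2 : List Int) : Int :=
  repls1.foldl (fun o p1 =>
    let x := PySem.List.slice toks1 (some p1.2.1) (some p1.2.2)
    repls2.foldl (fun o p2 =>
      let y := PySem.List.slice toks2 (some p2.2.1) (some p2.2.2)
      if x == y then o + overlap_of_ranges p1.1 p2.1 else o) o) 0

-- ===== PORT B =====
def overlap_of_replace_alt (repls1 : List ((Int × Int) × (Int × Int))) (repls2 : List ((Int × Int) × (Int × Int))) (toks1 : List Int) (toks2 : List Int) : Int :=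
  let groups : PySem.Dict (List Int) (List (Int × Int)) :=
    repls1.foldl (fun d p =>
      let key := PySem.List.slice toks1 (some p.2.1) (some p.2.2)
      d.modify key [] (· ++ [p.1])) PySem.Dict.empty
  repls2.foldl (fun total p =>
    (groups.getD (PySem.List.slice toks2 (some p.2.1) (some p.2.2)) []).foldl
      (fun total q => total + max 0 (min q.2 p.1.2 - max q.1 p.1.1)) total) 0

-- ===== PRECONDITION & SPEC =====
def Spec_overlap_of_replace (repls1 : List ((Int × Int) × (Int × Int))) (repls2 : List ((Int × Int) × (Int × Int))) (toks1 : List Int) (toks2 : List Int) (out : Int) : Prop := out = overlap_of_replace_alt repls1 repls2 toks1 toks2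
instance (repls1 : List ((Int × Int) × (Int × Int))) (repls2 : List ((Int × Int) × (Int × Int))) (toks1 : List Int) (toks2 : List Int) (out : Int) : Decidable (Spec_overlap_of_replace repls1 repls2 toks1 toks2 out) := by unfold Spec_overlap_of_replace; infer_instance

-- ===== CLAIM (what is proved, stated in full; the proofs are below) =====
def Claim_equal_overlap_of_replace : Prop := ∀ (repls1 : List ((Int × Int) × (Int × Int))) (repls2 : List ((Int × Int) × (Int × Int))) (toks1 : List Int) (toks2 : List Int), Dom_overlap_of_replace repls1 repls2 toks1 toks2 → Spec_overlap_of_replace repls1 repls2 toks1 toks2 (overlap_of_replace repls1 repls2 toks1 toks2)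

-- ===== LEMMAS AND PROOFS =====

-- a foldl whose every step adds g x is init + sum of g
theorem pv_foldl_step_add {β : Type} (l : List β) (step : Int → β → Int) (g : β → Int)
    (h : ∀ o x, step o x = o + g x) (a : Int) : l.foldl step a = a + (l.map g).sum := by
  induction l generalizing a with
  | nil => simp
  | cons x xs ih => simp only [List.foldl_cons, List.map_cons, List.sum_cons, h, ih]; ring

-- sum over a filtered list = sum of if-guarded terms over the whole list
theorem pv_sum_filter {β : Type} (l : List β) (c : β → Bool) (g : β → Int) :
    ((l.filter c).map g).sum = (l.map (fun x => if c x then g x else 0)).sum := by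
  induction l with
  | nil => simp
  | cons x xs ih =>
    by_cases hx : c x <;> simp [hx, ih]

-- pointwise sums distribute over a list sum
theorem pv_sum_map_add {γ : Type} (l : List γ) (g h : γ → Int) :
    (l.map (fun y => g y + h y)).sum = (l.map g).sum + (l.map h).sum := by
  induction l with
  | nil => simp
  | cons y ys ih => simp only [List.map_cons, List.sum_cons, ih]; ring

-- exchange of a double list sum
theorem pv_sum_comm {β γ : Type} (l1 : List β) (l2 : List γ) (f : β → γ → Int) :
    (l1.map (fun x => (l2.map (f x)).sum)).sum
      = (l2.map (fun y => (l1.map (fun x => f x y)).sum)).sum := by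
  induction l1 with
  | nil => simp
  | cons x xs ih =>
    simp only [List.map_cons, List.sum_cons, ih]
    rw [pv_sum_map_add]

-- the grouping dict looked up at k is exactly the matching r1's of repls1, in order
theorem pv_groups_getD (repls1 : List ((Int × Int) × (Int × Int))) (toks1 : List Int)
    (k : List Int) :
    ((repls1.foldl (fun d p =>
        d.modify (PySem.List.slice toks1 (some p.2.1) (some p.2.2)) [] (· ++ [p.1]))
        (PySem.Dict.empty : PySem.Dict (List Int) (List (Int × Int)))).getD k [])
      = ((repls1.filter (fun p => PySem.List.slice toks1 (some p.2.1) (some p.2.2) == k)).map (·.1)) := by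
  have h := PySem.Dict.getD_foldl_modify_append
      (l := repls1.map (fun p => (PySem.List.slice toks1 (some p.2.1) (some p.2.2), p.1)))
      (d := (PySem.Dict.empty : PySem.Dict (List Int) (List (Int × Int)))) (c := k)
  rw [List.foldl_map] at h
  simpa [List.filter_map, Function.comp, List.map_map] using h

-- overlap_of_ranges is the max-formula B uses
theorem pv_ov_eq (r1 r3 : Int × Int) :
    overlap_of_ranges r1 r3 = max 0 (min r1.2 r3.2 - max r1.1 r3.1) := by
  unfold overlap_of_ranges; dsimp only; omega

-- ===== VERDICT (by name: the statement is the Claim_ definition above) =====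
theorem overlap_of_replace_spec : Claim_equal_overlap_of_replace := by
  intro repls1 repls2 toks1 toks2 _
  unfold Spec_overlap_of_replace overlap_of_replace overlap_of_replace_alt
  -- reduce A to a double sum
  rw [pv_foldl_step_add repls1 _
      (fun p1 => (repls2.map (fun p2 =>
        if (PySem.List.slice toks1 (some p1.2.1) (some p1.2.2)
            == PySem.List.slice toks2 (some p2.2.1) (some p2.2.2))
        then overlap_of_ranges p1.1 p2.1 else 0)).sum)
      (fun o p1 => by
        dsimp only
        exact pv_foldl_step_add repls2 _
          (fun p2 => if (PySem.List.slice toks1 (some p1.2.1) (some p1.2.2)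
              == PySem.List.slice toks2 (some p2.2.1) (some p2.2.2))
            then overlap_of_ranges p1.1 p2.1 else 0)
          (fun o p2 => by dsimp only; split <;> simp) o)]
  -- reduce B to a double sum over repls2 then the matched group
  rw [pv_foldl_step_add repls2 _
      (fun p2 => ((((repls1.filter (fun p => PySem.List.slice toks1 (some p.2.1) (some p.2.2)
                      == PySem.List.slice toks2 (some p2.2.1) (some p2.2.2)))).map (·.1)).map
            (fun q => max 0 (min q.2 p2.1.2 - max q.1 p2.1.1))).sum)
      (fun o p2 => by
        dsimp only
        rw [pv_groups_getD repls1 toks1]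
        exact pv_foldl_step_add _ _ (fun (q : Int × Int) => max 0 (min q.2 p2.1.2 - max q.1 p2.1.1))
            (fun o q => rfl) o)]
  simp only [zero_add, List.map_map]
  rw [pv_sum_comm]
  congr 1
  apply List.map_congr_left
  intro p2 _
  rw [pv_sum_filter]
  apply congrArg
  apply List.map_congr_left
  intro p1 _
  simp only [Function.comp]
  split <;> simp [pv_ov_eq]
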